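-- pv_equiv track=rewrite | github.com/thaidinger/ml-in-fcs | experiments/metrics_quant.py | find_threshold
-- ===== SOURCE A (Python) =====
-- def find_threshold(segments, target_length=252*10):
--   """ Determine the sampling threshold to ensure the combined time series can achieve the target length """
--   threshold_idx = len(segments)
--   sum_length = 0
--   for segment in reversed(segments):
--     sum_length += len(segment)
--     threshold_idx -= 1
--     if sum_length > target_length:
--       break
--   return threshold_idx
-- ===== SOURCE B (Python) =====
-- def find_threshold(segments, target_length=252*10):
--     """ Determine the sampling threshold to ensure the combined time series can achieve the target length """
--     total = sum(len(s) for s in segments)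
--     acc = 0
--     result = 0
--     for j in range(len(segments)):
--         if total - acc > target_length:
--             result = j
--         else:
--             break
--         acc += len(segments[j])
--     return result
-- ===== Notes on version B (the rewrite author's own statement) =====
-- stated objective: alternative
-- what changed: B precomputes the total length once and sweeps forward deriving each suffix sum as total minus a prefix accumulator, instead of A's backward scan accumulating a suffix sum with a decrementing index.
import Mathlib
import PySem

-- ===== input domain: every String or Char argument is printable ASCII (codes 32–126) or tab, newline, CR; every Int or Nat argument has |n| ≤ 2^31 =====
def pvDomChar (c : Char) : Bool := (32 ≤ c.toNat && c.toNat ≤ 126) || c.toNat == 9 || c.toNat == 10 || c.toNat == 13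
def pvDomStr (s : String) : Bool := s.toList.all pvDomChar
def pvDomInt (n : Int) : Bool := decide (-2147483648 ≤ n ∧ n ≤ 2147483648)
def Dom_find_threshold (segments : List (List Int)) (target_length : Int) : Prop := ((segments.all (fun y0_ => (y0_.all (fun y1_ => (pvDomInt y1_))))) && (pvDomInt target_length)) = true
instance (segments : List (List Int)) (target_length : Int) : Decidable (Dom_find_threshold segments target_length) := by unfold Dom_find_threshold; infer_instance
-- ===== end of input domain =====

-- B computes suffix sums as total-minus-prefix in a forward sweep instead of A's backward accumulation; objective: alternative decomposition, same O(n) cost.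

-- ===== PORT A =====
-- the for-loop over reversed(segments) with break, carrying (sum_length, threshold_idx)
def ftA_loop (ys : List (List Int)) (sum_length threshold_idx target_length : Int) : Int :=
  match ys with
  | [] => threshold_idx
  | seg :: rest =>
    let sum' := sum_length + (seg.length : Int)
    let idx' := threshold_idx - 1
    if sum' > target_length then idx' else ftA_loop rest sum' idx' target_length

def find_threshold (segments : List (List Int)) (target_length : Int) : Int :=
  ftA_loop segments.reverse 0 (segments.length : Int) target_length

-- ===== PORT B =====
-- the for-loop over range(len(segments)) with break, carrying (acc, result, j)
def ftB_loop (xs : List (List Int)) (total acc result j target_length : Int) : Int :=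
  match xs with
  | [] => result
  | seg :: rest =>
    if total - acc > target_length then
      ftB_loop rest total (acc + (seg.length : Int)) j (j + 1) target_length
    else result

def find_threshold_alt (segments : List (List Int)) (target_length : Int) : Int :=
  let total := segments.foldl (fun a s => a + (s.length : Int)) 0
  ftB_loop segments total 0 0 0 target_length

-- ===== PRECONDITION & SPEC =====
def Spec_find_threshold (segments : List (List Int)) (target_length : Int) (out : Int) : Prop := out = find_threshold_alt segments target_length
instance (segments : List (List Int)) (target_length : Int) (out : Int) : Decidable (Spec_find_threshold segments target_length out) := by unfold Spec_find_threshold; infer_instance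

-- ===== CLAIM (what is proved, stated in full; the proofs are below) =====
def Claim_equal_find_threshold : Prop := ∀ (segments : List (List Int)) (target_length : Int), Dom_find_threshold segments target_length → Spec_find_threshold segments target_length (find_threshold segments target_length)

-- ===== LEMMAS AND PROOFS =====

-- total length of the segments, as Int
def ftS (l : List (List Int)) : Int := (l.map (fun s => ((s.length : Int)))).sum

-- reference value: the largest index whose suffix sum exceeds the target, else 0
def ftG : List (List Int) → Int → Int
  | [], _ => 0
  | _ :: xs, t => if xs ≠ [] ∧ ftS xs > t then 1 + ftG xs t else 0

-- whether A's loop breaks while consuming exactly the list l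
def ftBrk : List (List Int) → Int → Int → Bool
  | [], _, _ => false
  | y :: l, s, t => (decide (s + (y.length : Int) > t)) || ftBrk l (s + (y.length : Int)) t

theorem ftS_nonneg (l : List (List Int)) : 0 ≤ ftS l := by
  induction l with
  | nil => simp [ftS]
  | cons x xs ih => simp only [ftS, List.map_cons, List.sum_cons] at *; positivity

theorem ftS_reverse (l : List (List Int)) : ftS l.reverse = ftS l := by
  simp [ftS]

theorem ftBrk_iff (l : List (List Int)) : ∀ s t, ftBrk l s t = true ↔ (l ≠ [] ∧ s + ftS l > t) := by
  induction l with
  | nil => simp [ftBrk]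
  | cons y l ih =>
    intro s t
    have hS := ftS_nonneg l
    simp only [ftS] at hS
    have hy : (0:Int) ≤ (y.length : Int) := by positivity
    simp only [ftBrk, Bool.or_eq_true, decide_eq_true_eq, ih, ftS, List.map_cons, List.sum_cons]
    constructor
    · rintro (h | ⟨-, h⟩) <;> exact ⟨by simp, by omega⟩
    · rintro ⟨-, h⟩
      by_cases hl : l = []
      · subst hl; simp only [List.map_nil, List.sum_nil] at h; left; omega
      · by_cases hb : s + (y.length : Int) > t
        · left; exact hb
        · right; exact ⟨hl, by omega⟩

theorem ftA_append (l l₂ : List (List Int)) : ∀ s idx t,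
    ftA_loop (l ++ l₂) s idx t =
      if ftBrk l s t then ftA_loop l s idx t
      else ftA_loop l₂ (s + ftS l) (idx - (l.length : Int)) t := by
  induction l with
  | nil => intro s idx t; simp [ftBrk, ftS]
  | cons y l ih =>
    intro s idx t
    simp only [List.cons_append, ftA_loop, ftBrk, ftS, List.map_cons, List.sum_cons,
      List.length_cons, Bool.or_eq_true, decide_eq_true_eq]
    by_cases hb : s + (y.length : Int) > t
    · simp [hb]
    · simp only [ih, hb, false_or]
      by_cases hbrk : ftBrk l (s + (y.length : Int)) t = true
      · simp [hbrk]
      · simp only [hbrk, if_false, Bool.false_eq_true]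
        congr 1
        · simp only [ftS]; ring
        · push_cast; ring

theorem ftA_shift (ys : List (List Int)) : ∀ s i t,
    ftA_loop ys s (i + 1) t = ftA_loop ys s i t + 1 := by
  induction ys with
  | nil => intro s i t; simp [ftA_loop]
  | cons y ys ih =>
    intro s i t
    simp only [ftA_loop]
    by_cases hb : s + (y.length : Int) > t
    · simp only [if_pos hb]; ring
    · simp only [if_neg hb]
      have h : i + 1 - 1 = (i - 1) + 1 := by ring
      rw [h, ih]

theorem A_eq_g (segments : List (List Int)) : ∀ t, find_threshold segments t = ftG segments t := by
  induction segments with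
  | nil => intro t; simp [find_threshold, ftA_loop, ftG]
  | cons x segs ih =>
    intro t
    have hrev : (x :: segs).reverse = segs.reverse ++ [x] := by simp
    have hlen : (((x :: segs).length : Nat) : Int) = (segs.length : Int) + 1 := by simp
    simp only [find_threshold, hrev, hlen, ftA_append]
    by_cases h : segs ≠ [] ∧ ftS segs > t
    · have hb : ftBrk segs.reverse 0 t = true := by
        rw [ftBrk_iff]
        exact ⟨by simpa using h.1, by rw [ftS_reverse]; omega⟩
      rw [if_pos hb, ftA_shift, ftG, if_pos h]
      have := ih t
      simp only [find_threshold] at this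
      omega
    · have hb : ftBrk segs.reverse 0 t = false := by
        rw [Bool.eq_false_iff, Ne, ftBrk_iff, ftS_reverse]
        intro hc
        exact h ⟨by simpa using hc.1, by omega⟩
      rw [if_neg (by simp [hb]), ftG, if_neg h]
      simp only [ftA_loop, ftS_reverse, List.length_reverse]
      split <;> omega

theorem ftB_eq (xs : List (List Int)) : ∀ acc r j t,
    ftB_loop xs (acc + ftS xs) acc r j t =
      if xs ≠ [] ∧ ftS xs > t then j + ftG xs t else r := by
  induction xs with
  | nil => intro acc r j t; simp [ftB_loop]
  | cons x xs ih =>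
    intro acc r j t
    have hx : (0:Int) ≤ (x.length : Int) := by positivity
    have hSx : ftS (x :: xs) = (x.length : Int) + ftS xs := by simp [ftS]
    have hne : x :: xs ≠ [] := List.cons_ne_nil x xs
    simp only [ftB_loop]
    by_cases hc : ftS (x :: xs) > t
    · rw [if_pos (by omega)]
      have harg : acc + ftS (x :: xs) = (acc + (x.length : Int)) + ftS xs := by rw [hSx]; ring
      rw [harg, ih]
      by_cases h2 : xs ≠ [] ∧ ftS xs > t
      · rw [if_pos h2, if_pos ⟨hne, hc⟩, ftG, if_pos h2]; ring
      · rw [if_neg h2, if_pos ⟨hne, hc⟩, ftG, if_neg h2]; ring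
    · rw [if_neg (by omega), if_neg (by tauto)]

theorem foldl_sumlen (l : List (List Int)) : ∀ a : Int,
    l.foldl (fun a s => a + (s.length : Int)) a = a + ftS l := by
  induction l with
  | nil => intro a; simp [ftS]
  | cons x xs ih => intro a; simp only [List.foldl_cons, ih, ftS, List.map_cons, List.sum_cons]; ring

theorem B_eq_g (segments : List (List Int)) (t : Int) : find_threshold_alt segments t = ftG segments t := by
  have h0 : find_threshold_alt segments t = ftB_loop segments ((0:Int) + ftS segments) 0 0 0 t := by
    simp [find_threshold_alt, foldl_sumlen]
  rw [h0, ftB_eq]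
  by_cases h : segments ≠ [] ∧ ftS segments > t
  · rw [if_pos h]; ring
  · rw [if_neg h]
    cases segments with
    | nil => simp [ftG]
    | cons x xs =>
      have hx : (0:Int) ≤ (x.length : Int) := by positivity
      have hSx : ftS (x :: xs) = (x.length : Int) + ftS xs := by simp [ftS]
      have hle : ¬ ftS (x :: xs) > t := by tauto
      rw [ftG, if_neg (by rintro ⟨-, h2⟩; omega)]

-- ===== VERDICT (by name: the statement is the Claim_ definition above) =====
theorem find_threshold_spec : Claim_equal_find_threshold := by
  intro segments t _
  unfold Spec_find_threshold
  rw [A_eq_g, B_eq_g]
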